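-- pv_equiv track=rewrite | github.com/ApsilonXi/Second-year-labs | Codirovanie/lab3/lab3LZ_77.py | repeating_length_from_start
-- ===== SOURCE A (Python) =====
-- def repeating_length_from_start(window: str, input_string: str) -> int:
--     """Получает максимальную повторяющуюся длину ввода с начала окна"""
--     try:
--         if window == "" or input_string == "":
--             return 0
--     except RecursionError:
--         return 0
--
--     if window[0] == input_string[0]:
--         return 1 + repeating_length_from_start(
--             window[1:] + input_string[0], input_string[1:]
--         )
--     else:
--         return 0
-- ===== SOURCE B (Python) =====
-- def repeating_length_from_start(window: str, input_string: str) -> int: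
--     """Longest overlapping prefix match: one pass over window+input, no window rotation."""
--     if not window:
--         return 0
--     text = window + input_string
--     i = 0
--     for a, b in zip(text, input_string):
--         if a != b:
--             break
--         i += 1
--     return i
-- ===== Notes on version B (the rewrite author's own statement) =====
-- stated objective: faster
-- what changed: Replaces the recursion that rebuilds (slices and re-concatenates) the window on every matched character with a single linear scan comparing window+input against input by position.
import Mathlib
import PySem

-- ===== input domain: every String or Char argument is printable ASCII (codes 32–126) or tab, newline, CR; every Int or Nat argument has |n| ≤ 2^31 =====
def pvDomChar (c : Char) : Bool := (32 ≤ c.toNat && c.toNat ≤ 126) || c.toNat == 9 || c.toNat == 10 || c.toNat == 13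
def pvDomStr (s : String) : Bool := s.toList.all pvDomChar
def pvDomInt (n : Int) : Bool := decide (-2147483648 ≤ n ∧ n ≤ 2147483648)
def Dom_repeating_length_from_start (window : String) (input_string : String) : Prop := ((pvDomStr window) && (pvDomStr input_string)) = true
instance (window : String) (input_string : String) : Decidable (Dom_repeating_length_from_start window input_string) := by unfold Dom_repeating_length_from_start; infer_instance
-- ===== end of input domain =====

-- B replaces A's window-rotating recursion by one linear scan of window+input; A's recursion-limit
-- behaviour (RecursionError on very long matches) is not modelled: the port of A is total.
-- ===== PORT A =====
-- A's recursion over the two strings, as lists of chars: drop the heads, rotate the matched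
-- char to the end of the window (window[1:] + input_string[0]), recurse on input_string[1:].
def repGoA : List Char → List Char → Int
  | [], _ => 0
  | _ :: _, [] => 0
  | a :: w, c :: s => if a = c then 1 + repGoA (w ++ [c]) s else 0

def repeating_length_from_start (window : String) (input_string : String) : Int :=
  repGoA window.toList input_string.toList

-- ===== PORT B =====
-- Source B: if window empty return 0; else count leading positions where (window+input)[i] == input[i]
-- (the for-loop over zip(text, input_string) with break = takeWhile on the zipped list).
def repeating_length_from_start_alt (window : String) (input_string : String) : Int :=
  if window.toList = [] then 0
  else ((((window.toList ++ input_string.toList).zip input_string.toList).takeWhile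
      (fun p => p.1 == p.2)).length : Int)

-- ===== PRECONDITION & SPEC =====
def Spec_repeating_length_from_start (window : String) (input_string : String) (out : Int) : Prop := out = repeating_length_from_start_alt window input_string
instance (window : String) (input_string : String) (out : Int) : Decidable (Spec_repeating_length_from_start window input_string out) := by unfold Spec_repeating_length_from_start; infer_instance

-- ===== CLAIM (what is proved, stated in full; the proofs are below) =====
def Claim_equal_repeating_length_from_start : Prop := ∀ (window : String) (input_string : String), Dom_repeating_length_from_start window input_string → Spec_repeating_length_from_start window input_string (repeating_length_from_start window input_string)

-- ===== LEMMAS AND PROOFS =====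
-- A's rotating recursion computes exactly the length of the matching zipped prefix of (w++s, s).
lemma repGoA_eq_takeWhile : ∀ (s w : List Char), w ≠ [] →
    repGoA w s = (((w ++ s).zip s).takeWhile (fun p => p.1 == p.2)).length := by
  intro s
  induction s with
  | nil => intro w hw; cases w with
    | nil => simp at hw
    | cons a w' => simp [repGoA]
  | cons c s' ih =>
    intro w hw
    cases w with
    | nil => simp at hw
    | cons a w' =>
      simp only [repGoA, List.cons_append, List.zip_cons_cons, List.takeWhile]
      by_cases h : a = c
      · have hne : w' ++ [c] ≠ [] := by simp
        have := ih (w' ++ [c]) hne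
        simp only [h, beq_self_eq_true, if_true, List.length_cons, this,
          List.append_assoc, List.singleton_append]
        push_cast
        ring
      · have hb : (a == c) = false := by simp [h]
        simp [h, hb]

-- ===== VERDICT (by name: the statement is the Claim_ definition above) =====
theorem repeating_length_from_start_spec : Claim_equal_repeating_length_from_start := by
  intro window input_string _
  unfold Spec_repeating_length_from_start repeating_length_from_start repeating_length_from_start_alt
  by_cases hw : window.toList = []
  · simp [hw, repGoA]
  · simp only [hw, if_false]
    exact repGoA_eq_takeWhile _ _ hw
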